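-- pv_equiv track=rewrite | github.com/yogesh-dbx/ai-dev-kit | databricks-tools-core/databricks_tools_core/sql/sql_utils/table_stats_collector.py | _extract_column_samples
-- ===== SOURCE A (Python) =====
-- from typing import Any, Dict, List, Optional, Tuple
--
-- def _extract_column_samples(
--     columns_info: List[Dict], sample_data: Optional[List[Dict]]
-- ) -> Dict[str, List[str]]:
--     """Extract sample values for each column."""
--     column_samples: Dict[str, List[str]] = {}
--     if not sample_data:
--         return column_samples
--
--     for col_info in columns_info:
--         col_name = col_info.get("col_name", "")
--         if not col_name or col_name.startswith(("#", "_")):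
--             continue
--
--         seen = set()
--         samples = []
--         for row in sample_data:
--             if col_name in row and row[col_name] is not None:
--                 val_str = str(row[col_name])
--                 if len(val_str) > 15:
--                     val_str = val_str[:15] + "..."
--                 if val_str not in seen:
--                     seen.add(val_str)
--                     samples.append(val_str)
--                     if len(samples) >= 3:
--                         break
--         column_samples[col_name] = samples
--
--     return column_samples
-- ===== SOURCE B (Python) =====
-- from typing import Any, Dict, List, Optional
--
--
-- def _extract_column_samples(
--     columns_info: List[Dict], sample_data: Optional[List[Dict]]
-- ) -> Dict[str, List[str]]:
--     """Extract sample values for each column (dedup-pipeline decomposition)."""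
--     if not sample_data:
--         return {}
--
--     def _truncate(value):
--         s = str(value)
--         return s if len(s) <= 15 else s[:15] + "..."
--
--     def _samples_for(name):
--         vals = [_truncate(row[name]) for row in sample_data
--                 if name in row and row[name] is not None]
--         return list(dict.fromkeys(vals))[:3]
--
--     return {
--         name: _samples_for(name)
--         for name in (ci.get("col_name", "") for ci in columns_info)
--         if name and not name.startswith(("#", "_"))
--     }
-- ===== Notes on version B (the rewrite author's own statement) =====
-- stated objective: simpler
-- what changed: A's hand-maintained per-column state machine (seen-set, append, early break at 3) is replaced by a declarative pipeline: collect all truncated values per valid column, order-preserving dedup via dict.fromkeys, slice the first 3; the outer loop becomes a dict comprehension over a filtered name generator.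
import Mathlib
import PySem

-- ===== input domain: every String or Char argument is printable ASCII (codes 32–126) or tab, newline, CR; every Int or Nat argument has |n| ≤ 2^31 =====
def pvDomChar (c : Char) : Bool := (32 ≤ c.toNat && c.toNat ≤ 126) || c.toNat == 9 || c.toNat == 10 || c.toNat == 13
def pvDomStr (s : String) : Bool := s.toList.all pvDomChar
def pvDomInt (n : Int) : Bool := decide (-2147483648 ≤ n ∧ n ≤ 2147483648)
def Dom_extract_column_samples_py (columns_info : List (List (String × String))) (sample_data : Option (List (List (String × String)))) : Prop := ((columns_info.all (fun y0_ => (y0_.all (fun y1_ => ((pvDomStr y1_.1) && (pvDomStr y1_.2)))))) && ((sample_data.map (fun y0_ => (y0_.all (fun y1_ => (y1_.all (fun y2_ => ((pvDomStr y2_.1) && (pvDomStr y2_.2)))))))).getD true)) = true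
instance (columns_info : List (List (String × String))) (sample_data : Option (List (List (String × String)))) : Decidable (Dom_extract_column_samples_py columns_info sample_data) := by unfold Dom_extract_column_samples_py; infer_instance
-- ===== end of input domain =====

-- B replaces A's per-column scan with a seen-set and early break by a dedup pipeline
-- (collect all values, dict.fromkeys dedup, take 3); objective: simpler, not faster.

-- ===== PORT A =====
-- str(v) then 'if len > 15: v[:15] + "..."'; string concatenation done on code-point lists (exact)
def pvTruncA (v : String) : String :=
  if 15 < PySem.Str.len v
  then String.ofList (PySem.List.slice v.toList none (some (15 : Int)) ++ "...".toList)
  else v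

-- the 'for row in sample_data' loop with seen-set, append and 'break' at 3 samples
def pvLoopA (name : String) (rows : List (List (String × String)))
    (seen : PySem.Set String) (samples : List String) : List String :=
  match rows with
  | [] => samples
  | row :: rest =>
    match PySem.Dict.get? (PySem.Dict.mk row) name with
    | none => pvLoopA name rest seen samples
    | some v =>
      let vs := pvTruncA v
      if PySem.Set.contains seen vs then pvLoopA name rest seen samples
      else
        let samples' := samples ++ [vs]
        if 3 ≤ samples'.length then samples'
        else pvLoopA name rest (PySem.Set.add seen vs) samples'

def extract_column_samples_py (columns_info : List (List (String × String))) (sample_data : Option (List (List (String × String)))) : List (String × List String) :=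
  match sample_data with
  | none => []          -- 'if not sample_data: return {}'
  | some rows =>
    if rows.isEmpty then []
    else
      (columns_info.foldl (fun d col_info =>
        let col_name := PySem.Dict.getD (PySem.Dict.mk col_info) "col_name" ""
        if col_name = "" ∨ PySem.Str.startswith col_name "#" ∨ PySem.Str.startswith col_name "_"
        then d          -- 'continue'
        else PySem.Dict.insert d col_name (pvLoopA col_name rows PySem.Set.empty []))
        PySem.Dict.empty).items

-- ===== PORT B =====
-- B's _truncate helper (same truncation expression as the Python)
def pvTruncB (v : String) : String :=
  if PySem.Str.len v ≤ 15 then v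
  else String.ofList (PySem.List.slice v.toList none (some (15 : Int)) ++ "...".toList)

-- B's _samples_for: vals comprehension, then list(dict.fromkeys(vals))[:3]
def pvSamplesFor (name : String) (rows : List (List (String × String))) : List String :=
  let vals := (rows.filterMap (fun row => PySem.Dict.get? (PySem.Dict.mk row) name)).map pvTruncB
  (PySem.List.dedup vals).take 3

def extract_column_samples_py_alt (columns_info : List (List (String × String))) (sample_data : Option (List (List (String × String)))) : List (String × List String) :=
  match sample_data with
  | none => []          -- 'if not sample_data: return {}'
  | some rows =>
    if rows.isEmpty then []
    else
      -- the dict comprehension: generator of names, filter, dict built key by key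
      (((columns_info.map (fun ci => PySem.Dict.getD (PySem.Dict.mk ci) "col_name" "")).filter
          (fun name => !(decide (name = "") || PySem.Str.startswith name "#" || PySem.Str.startswith name "_")))
        |>.foldl (fun d name => PySem.Dict.insert d name (pvSamplesFor name rows)) PySem.Dict.empty).items

-- ===== PRECONDITION & SPEC =====
def Spec_extract_column_samples_py (columns_info : List (List (String × String))) (sample_data : Option (List (List (String × String)))) (out : List (String × List String)) : Prop := out = extract_column_samples_py_alt columns_info sample_data
instance (columns_info : List (List (String × String))) (sample_data : Option (List (List (String × String)))) (out : List (String × List String)) : Decidable (Spec_extract_column_samples_py columns_info sample_data out) := by unfold Spec_extract_column_samples_py; infer_instance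

-- ===== CLAIM (what is proved, stated in full; the proofs are below) =====
def Claim_equal_extract_column_samples_py : Prop := ∀ (columns_info : List (List (String × String))) (sample_data : Option (List (List (String × String)))), Dom_extract_column_samples_py columns_info sample_data → Spec_extract_column_samples_py columns_info sample_data (extract_column_samples_py columns_info sample_data)

-- ===== LEMMAS AND PROOFS =====

-- both truncations are the same function
theorem pvTruncA_eq_pvTruncB : pvTruncA = pvTruncB := by
  funext v
  simp only [pvTruncA, pvTruncB]
  by_cases h : PySem.Str.len v ≤ 15
  · rw [if_neg (by omega), if_pos h]
  · rw [if_pos (by omega), if_neg h]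

-- the distinct elements of l that are not in seen, in first-occurrence order (proof-side view of A's seen-set)
def pvNewDistinct (seen : PySem.Set String) : List String → List String
  | [] => []
  | v :: t =>
    if PySem.Set.contains seen v then pvNewDistinct seen t
    else v :: pvNewDistinct (PySem.Set.add seen v) t

theorem foldl_add_eq_append_pvNewDistinct (l : List String) :
    ∀ s : PySem.Set String, l.foldl PySem.Set.add s = s ++ pvNewDistinct s l := by
  induction l with
  | nil => intro s; simp [pvNewDistinct]
  | cons v t ih =>
    intro s
    by_cases h : v ∈ s
    · have hc : PySem.Set.contains s v = true := by simp [PySem.Set.contains, h]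
      have hadd : PySem.Set.add s v = s := by simp [PySem.Set.add, h]
      rw [List.foldl_cons, hadd, ih]
      simp [pvNewDistinct, h]
    · have hc : PySem.Set.contains s v = false := by simp [PySem.Set.contains, h]
      have hadd : PySem.Set.add s v = s ++ [v] := by simp [PySem.Set.add, h]
      rw [List.foldl_cons, hadd, ih]
      simp [pvNewDistinct, h]

-- A's row loop computes: take (3 - #samples) of the new distinct truncated values, appended to samples
theorem pvLoopA_eq (name : String) (rows : List (List (String × String))) :
    ∀ (seen : PySem.Set String) (samples : List String), samples.length < 3 →
      pvLoopA name rows seen samples =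
        samples ++ (pvNewDistinct seen
          ((rows.filterMap (fun row => PySem.Dict.get? (PySem.Dict.mk row) name)).map pvTruncA)).take
            (3 - samples.length) := by
  induction rows with
  | nil => intro seen samples _; simp [pvLoopA, pvNewDistinct]
  | cons row rest ih =>
    intro seen samples hlen
    simp only [pvLoopA, List.filterMap_cons]
    cases hget : PySem.Dict.get? (PySem.Dict.mk row) name with
    | none => simpa using ih seen samples hlen
    | some v =>
      simp only [List.map_cons]
      by_cases hseen : PySem.Set.contains seen (pvTruncA v)
      · simp only [hseen, if_pos, pvNewDistinct]
        simpa [hseen] using ih seen samples hlen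
      · simp only [hseen, Bool.false_eq_true, if_neg, not_false_iff, pvNewDistinct]
        have htake : (3 - samples.length) = (3 - (samples.length + 1)) + 1 := by omega
        by_cases h3 : 3 ≤ (samples ++ [pvTruncA v]).length
        · have hs2 : samples.length = 2 := by simp at h3; omega
          simp [hs2, List.take_succ_cons]
        · simp only [h3, if_neg, not_false_iff]
          rw [ih (PySem.Set.add seen (pvTruncA v)) (samples ++ [pvTruncA v]) (by simp at h3 ⊢; omega)]
          simp [htake, List.take_succ_cons]

theorem pvLoopA_eq_pvSamplesFor (name : String) (rows : List (List (String × String))) :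
    pvLoopA name rows PySem.Set.empty [] = pvSamplesFor name rows := by
  rw [pvLoopA_eq name rows PySem.Set.empty [] (by simp)]
  simp only [pvSamplesFor, PySem.List.dedup_eq_ofList, PySem.Set.ofList_eq_foldl,
    pvTruncA_eq_pvTruncB]
  rw [show PySem.Set.empty = ([] : List String) from rfl,
    foldl_add_eq_append_pvNewDistinct]
  simp

-- the two column folds build the same dict
theorem pvFold_eq (rows : List (List (String × String))) (cols : List (List (String × String))) :
    ∀ d : PySem.Dict String (List String),
      cols.foldl (fun d col_info =>
        let col_name := PySem.Dict.getD (PySem.Dict.mk col_info) "col_name" ""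
        if col_name = "" ∨ PySem.Str.startswith col_name "#" ∨ PySem.Str.startswith col_name "_"
        then d
        else PySem.Dict.insert d col_name (pvLoopA col_name rows PySem.Set.empty [])) d =
      ((cols.map (fun ci => PySem.Dict.getD (PySem.Dict.mk ci) "col_name" "")).filter
          (fun name => !(decide (name = "") || PySem.Str.startswith name "#" || PySem.Str.startswith name "_"))).foldl
        (fun d name => PySem.Dict.insert d name (pvSamplesFor name rows)) d := by
  induction cols with
  | nil => intro d; simp
  | cons ci rest ih =>
    intro d
    simp only [List.foldl_cons, List.map_cons, List.filter_cons]
    by_cases hb : (decide ((PySem.Dict.getD (PySem.Dict.mk ci) "col_name" "") = "") ||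
        PySem.Str.startswith (PySem.Dict.getD (PySem.Dict.mk ci) "col_name" "") "#" ||
        PySem.Str.startswith (PySem.Dict.getD (PySem.Dict.mk ci) "col_name" "") "_") = true
    · have hp : (PySem.Dict.getD (PySem.Dict.mk ci) "col_name" "") = "" ∨
          PySem.Str.startswith (PySem.Dict.getD (PySem.Dict.mk ci) "col_name" "") "#" = true ∨
          PySem.Str.startswith (PySem.Dict.getD (PySem.Dict.mk ci) "col_name" "") "_" = true := by
        rcases Bool.or_eq_true_iff.mp hb with h | h
        · rcases Bool.or_eq_true_iff.mp h with h' | h'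
          · exact Or.inl (of_decide_eq_true h')
          · exact Or.inr (Or.inl h')
        · exact Or.inr (Or.inr h)
      rw [if_pos hp, hb]
      simp only [Bool.not_true, Bool.false_eq_true, if_neg, not_false_iff]
      exact ih d
    · have hb' := Bool.not_eq_true _ ▸ Bool.eq_false_iff.mpr hb
      have hp : ¬ ((PySem.Dict.getD (PySem.Dict.mk ci) "col_name" "") = "" ∨
          PySem.Str.startswith (PySem.Dict.getD (PySem.Dict.mk ci) "col_name" "") "#" = true ∨
          PySem.Str.startswith (PySem.Dict.getD (PySem.Dict.mk ci) "col_name" "") "_" = true) := by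
        intro hcase
        apply hb
        rcases hcase with h | h | h
        · simp only [h, decide_true, Bool.true_or]
        · simp only [h, Bool.or_true, Bool.true_or]
        · simp only [h, Bool.or_true]
      rw [if_neg hp]
      have hbf : (decide ((PySem.Dict.getD (PySem.Dict.mk ci) "col_name" "") = "") ||
          PySem.Str.startswith (PySem.Dict.getD (PySem.Dict.mk ci) "col_name" "") "#" ||
          PySem.Str.startswith (PySem.Dict.getD (PySem.Dict.mk ci) "col_name" "") "_") = false :=
        Bool.eq_false_iff.mpr hb
      rw [hbf]
      simp only [Bool.not_false, if_pos, List.foldl_cons]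
      rw [pvLoopA_eq_pvSamplesFor]
      exact ih _

-- ===== VERDICT (by name: the statement is the Claim_ definition above) =====
theorem extract_column_samples_py_spec : Claim_equal_extract_column_samples_py := by
  intro columns_info sample_data _
  unfold Spec_extract_column_samples_py extract_column_samples_py extract_column_samples_py_alt
  cases sample_data with
  | none => rfl
  | some rows =>
    by_cases h : rows.isEmpty
    · simp [h]
    · simp only [h, Bool.false_eq_true, if_neg, not_false_iff]
      rw [pvFold_eq]
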